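-- pv_equiv track=rewrite | github.com/ImJoke/dsec | dsec/tools/pty_terminal.py | _clean_exec_output
-- ===== SOURCE A (Python) =====
-- from typing import Dict, List, Optional
--
-- _PROMPT_PATTERNS: List[str] = [
--     "Evil-WinRM",      # evil-winrm (literal asterisks in prompt vary; match core string)
--     "PS C:\\",         # PowerShell
--     "PS C:/",
--     "C:\\Windows\\",
--     "C:\\Users\\",
--     "SQL>",            # mssqlclient
--     ">>> ",            # Python REPL
--     "$ ",              # bash
--     "# ",              # root bash
--     "bash-",           # bash without PS1
--     "smb: \\>",        # smbclient
-- ]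
--
-- def _clean_exec_output(raw: str, command: str) -> str:
--     """
--     Strip command echo and trailing prompt from exec output.
--     Returns just the command's output, ready for the AI to parse.
--     """
--     lines = raw.splitlines()
--     result_lines = []
--     cmd_stripped = command.strip()
--     in_output = False
--
--     for line in lines:
--         line_clean = line.strip()
--         # Skip the command echo line
--         if not in_output:
--             if cmd_stripped and cmd_stripped in line_clean:
--                 in_output = True
--                 continue
--             # Fallback: start after first non-empty line
--             if line_clean:
--                 in_output = True
--                 result_lines.append(line)
--             continue
--         # Skip trailing prompt lines
--         is_prompt = any(pat.strip() in line_clean for pat in _PROMPT_PATTERNS if pat.strip())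
--         if is_prompt and (line_clean.endswith(">") or line_clean.endswith("$") or line_clean.endswith("# ")):
--             break
--         result_lines.append(line)
--
--     return "\n".join(result_lines).strip()
-- ===== SOURCE B (Python) =====
-- _PROMPT_PATTERNS = [
--     "Evil-WinRM",
--     "PS C:\\",
--     "PS C:/",
--     "C:\\Windows\\",
--     "C:\\Users\\",
--     "SQL>",
--     ">>> ",
--     "$ ",
--     "# ",
--     "bash-",
--     "smb: \\>",
-- ]
--
--
-- def _is_break(lc):
--     return any(p.strip() in lc for p in _PROMPT_PATTERNS if p.strip()) and (
--         lc.endswith(">") or lc.endswith("$") or lc.endswith("# ")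
--     )
--
--
-- def _clean_exec_output(raw: str, command: str) -> str:
--     # Index-and-slice formulation: locate the first non-empty line and the first
--     # prompt-break line after it, then return one slice of the line list.
--     lines = raw.splitlines()
--     cmd = command.strip()
--     first = next((i for i, l in enumerate(lines) if l.strip()), None)
--     if first is None:
--         return ""
--     echo = bool(cmd) and cmd in lines[first].strip()
--     start = first + 1 if echo else first
--     stop = next((i for i in range(first + 1, len(lines)) if _is_break(lines[i].strip())),
--                 len(lines))
--     return "\n".join(lines[start:stop]).strip()
-- ===== Notes on version B (the rewrite author's own statement) =====
-- stated objective: alternative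
-- what changed: Replaces A's stateful flag loop that accumulates result_lines with an index-and-slice formulation: compute the index of the first non-empty line and the index of the first prompt-break line after it, then return a single slice lines[start:stop] joined and stripped.
import Mathlib
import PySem

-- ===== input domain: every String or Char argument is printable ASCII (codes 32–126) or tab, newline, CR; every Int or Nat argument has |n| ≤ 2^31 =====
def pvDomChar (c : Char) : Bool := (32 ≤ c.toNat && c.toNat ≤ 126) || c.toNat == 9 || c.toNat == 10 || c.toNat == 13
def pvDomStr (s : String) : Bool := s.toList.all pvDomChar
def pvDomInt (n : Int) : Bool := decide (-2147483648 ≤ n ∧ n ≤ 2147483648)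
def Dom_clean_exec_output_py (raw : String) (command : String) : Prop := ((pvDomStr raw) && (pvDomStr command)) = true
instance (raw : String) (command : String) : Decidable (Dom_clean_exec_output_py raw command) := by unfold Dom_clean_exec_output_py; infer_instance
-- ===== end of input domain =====

-- B replaces A's stateful flag-loop with accumulator by an index-and-slice formulation:
-- find the index of the first non-empty line and the index of the first prompt-break line
-- after it, then return one slice of the line list (objective: alternative); same value.

-- module constant _PROMPT_PATTERNS (shared by both Pythons)
def pvPromptPatterns : List String :=
  ["Evil-WinRM", "PS C:\\", "PS C:/", "C:\\Windows\\", "C:\\Users\\",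
   "SQL>", ">>> ", "$ ", "# ", "bash-", "smb: \\>"]

-- ===== PORT A =====
-- A's for-loop over lines with state (result_lines, in_output), branches in source order
def pvALoop (cmd : String) : List String → List String → Bool → List String
  | [], acc, _ => acc
  | l :: ls, acc, inOut =>
    let lc := PySem.Str.strip l
    if !inOut then
      if cmd != "" && PySem.Str.isIn cmd lc then pvALoop cmd ls acc true
      else if lc != "" then pvALoop cmd ls (acc ++ [l]) true
      else pvALoop cmd ls acc false
    else
      if ((pvPromptPatterns.filter fun p => PySem.Str.strip p != "").any
            fun p => PySem.Str.isIn (PySem.Str.strip p) lc)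
         && (PySem.Str.endswith lc ">" || PySem.Str.endswith lc "$" || PySem.Str.endswith lc "# ")
      then acc   -- break
      else pvALoop cmd ls (acc ++ [l]) true

def clean_exec_output_py (raw : String) (command : String) : String :=
  PySem.Str.strip (PySem.Str.join "\n"
    (pvALoop (PySem.Str.strip command) (PySem.Str.splitlines raw) [] false))

-- ===== PORT B =====
def pvIsBreak (lc : String) : Bool :=
  ((pvPromptPatterns.filter fun p => PySem.Str.strip p != "").any
      fun p => PySem.Str.isIn (PySem.Str.strip p) lc)
  && (PySem.Str.endswith lc ">" || PySem.Str.endswith lc "$" || PySem.Str.endswith lc "# ")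

def clean_exec_output_py_alt (raw : String) (command : String) : String :=
  let lines := PySem.Str.splitlines raw
  let cmd := PySem.Str.strip command
  match lines.findIdx? (fun l => PySem.Str.strip l != "") with
  | none => ""
  | some first =>
    let echo := cmd != "" && PySem.Str.isIn cmd (PySem.Str.strip (lines.getD first ""))
    let start := if echo then first + 1 else first
    let tail := lines.drop (first + 1)
    let stop := (first + 1) +
      (match tail.findIdx? (fun l => pvIsBreak (PySem.Str.strip l)) with
       | none => tail.length
       | some k => k)
    PySem.Str.strip (PySem.Str.join "\n" ((lines.take stop).drop start))

-- ===== PRECONDITION & SPEC =====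
def Spec_clean_exec_output_py (raw : String) (command : String) (out : String) : Prop := out = clean_exec_output_py_alt raw command
instance (raw : String) (command : String) (out : String) : Decidable (Spec_clean_exec_output_py raw command out) := by unfold Spec_clean_exec_output_py; infer_instance

-- ===== CLAIM (what is proved, stated in full; the proofs are below) =====
def Claim_equal_clean_exec_output_py : Prop := ∀ (raw : String) (command : String), Dom_clean_exec_output_py raw command → Spec_clean_exec_output_py raw command (clean_exec_output_py raw command)

-- ===== LEMMAS AND PROOFS =====

-- proof-side helpers: A's loop once in_output collects pvCollect; the first non-empty split
def pvSplitFirstNonempty : List String → Option (String × List String)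
  | [] => none
  | l :: ls => if PySem.Str.strip l != "" then some (l, ls) else pvSplitFirstNonempty ls

def pvCollect : List String → List String
  | [] => []
  | l :: ls => if pvIsBreak (PySem.Str.strip l) then [] else l :: pvCollect ls

-- the stop index B computes, as a named function
def pvStopIdx (ls : List String) : Nat :=
  match ls.findIdx? (fun l => pvIsBreak (PySem.Str.strip l)) with
  | none => ls.length
  | some k => k

lemma pvALoop_cons_true (cmd l : String) (t acc : List String) :
    pvALoop cmd (l :: t) acc true =
      if pvIsBreak (PySem.Str.strip l) then acc
      else pvALoop cmd t (acc ++ [l]) true := by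
  rw [pvALoop]; simp [pvIsBreak]

lemma pvALoop_cons_false (cmd l : String) (t acc : List String) :
    pvALoop cmd (l :: t) acc false =
      if cmd != "" && PySem.Str.isIn cmd (PySem.Str.strip l) then pvALoop cmd t acc true
      else if PySem.Str.strip l != "" then pvALoop cmd t (acc ++ [l]) true
      else pvALoop cmd t acc false := by
  rw [pvALoop]; simp

lemma pvALoop_true (cmd : String) : ∀ (ls acc : List String),
    pvALoop cmd ls acc true = acc ++ pvCollect ls := by
  intro ls
  induction ls with
  | nil => intro acc; simp [pvALoop, pvCollect]
  | cons l t ih =>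
    intro acc
    rw [pvALoop_cons_true]
    cases h : pvIsBreak (PySem.Str.strip l) <;> simp [pvCollect, h, ih]

lemma pv_isIn_empty_false {cmd : String} (h : cmd ≠ "") :
    PySem.Chars.isIn cmd.toList [] = false := by
  rw [← Bool.not_eq_true, PySem.Chars.isIn_iff_infix]
  intro hinf
  have hnil : cmd.toList = [] := List.eq_nil_of_infix_nil hinf
  exact h (by simpa using hnil)

lemma pvALoop_false (cmd : String) : ∀ (ls : List String),
    pvALoop cmd ls [] false =
      match pvSplitFirstNonempty ls with
      | none => []
      | some (first, rest) =>
        if cmd != "" && PySem.Str.isIn cmd (PySem.Str.strip first)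
        then pvCollect rest
        else first :: pvCollect rest := by
  intro ls
  induction ls with
  | nil => simp [pvALoop, pvSplitFirstNonempty]
  | cons l t ih =>
    rw [pvALoop_cons_false]
    by_cases hl : PySem.Str.strip l = ""
    · by_cases hc : cmd = ""
      · subst hc
        simp [pvSplitFirstNonempty, hl, ih]
      · have hf : PySem.Chars.isIn cmd.toList [] = false := pv_isIn_empty_false hc
        simp [pvSplitFirstNonempty, hl, hf, hc, ih]
    · cases hecho : (cmd != "" && PySem.Str.isIn cmd (PySem.Str.strip l)) with
      | false =>
        have h' : ∀ _ : ¬cmd = "", PySem.Chars.isIn cmd.toList (PySem.Chars.strip l.toList) = false := by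
          intro hc; simpa [hc] using hecho
        simp [pvSplitFirstNonempty, hl, pvALoop_true]
        exact h'
      | true =>
        have h' : ¬cmd = "" ∧ PySem.Chars.isIn cmd.toList (PySem.Chars.strip l.toList) = true := by
          simpa using hecho
        simp [pvSplitFirstNonempty, hl, pvALoop_true, h'.1, h'.2]

lemma pvStopIdx_cons (l : String) (t : List String) :
    pvStopIdx (l :: t) =
      if pvIsBreak (PySem.Str.strip l) then 0 else pvStopIdx t + 1 := by
  unfold pvStopIdx
  rw [List.findIdx?_cons]
  by_cases h : pvIsBreak (PySem.Str.strip l)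
  · simp [h]
  · simp only [h, Bool.false_eq_true, if_false]
    cases (t.findIdx? fun l => pvIsBreak (PySem.Str.strip l)) <;> simp

lemma pvCollect_eq_take : ∀ ls : List String, pvCollect ls = ls.take (pvStopIdx ls) := by
  intro ls
  induction ls with
  | nil => simp [pvCollect, pvStopIdx]
  | cons l t ih =>
    rw [pvStopIdx_cons]
    by_cases h : pvIsBreak (PySem.Str.strip l) <;> simp [pvCollect, h, ih]

lemma pvSplit_eq_findIdx? : ∀ ls : List String,
    pvSplitFirstNonempty ls =
      (ls.findIdx? (fun l => PySem.Str.strip l != "")).map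
        (fun f => (ls.getD f "", ls.drop (f + 1))) := by
  intro ls
  induction ls with
  | nil => simp [pvSplitFirstNonempty]
  | cons l t ih =>
    rw [List.findIdx?_cons]
    by_cases h : PySem.Str.strip l = ""
    · have hne : (PySem.Str.strip l != "") = false := by simp [h]
      simp only [pvSplitFirstNonempty, hne, Bool.false_eq_true, if_false, ih,
        Option.map_map]
      cases hf : t.findIdx? (fun l => PySem.Str.strip l != "") <;> simp
    · have hne : (PySem.Str.strip l != "") = true := by simp [h]
      simp [pvSplitFirstNonempty, hne]

-- ===== VERDICT (by name: the statement is the Claim_ definition above) =====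
set_option maxHeartbeats 1000000 in
theorem clean_exec_output_py_spec : Claim_equal_clean_exec_output_py := by
  intro raw command _
  unfold Spec_clean_exec_output_py clean_exec_output_py clean_exec_output_py_alt
  rw [pvALoop_false, pvSplit_eq_findIdx?]
  cases h : (PySem.Str.splitlines raw).findIdx? (fun l => PySem.Str.strip l != "") with
  | none =>
      simp only [h, Option.map_none]
      decide
  | some first =>
      have hlt : first < (PySem.Str.splitlines raw).length := by
        have := List.findIdx?_eq_some_iff_findIdx_eq.mp h
        exact this.1
      simp only [h, Option.map_some]
      rw [pvCollect_eq_take]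
      refine congrArg _ (congrArg _ ?_)
      have hst : (match ((PySem.Str.splitlines raw).drop (first + 1)).findIdx?
              (fun l => pvIsBreak (PySem.Str.strip l)) with
            | none => ((PySem.Str.splitlines raw).drop (first + 1)).length
            | some k => k) = pvStopIdx ((PySem.Str.splitlines raw).drop (first + 1)) := rfl
      rw [hst]
      by_cases hecho : (PySem.Str.strip command != "" &&
          PySem.Str.isIn (PySem.Str.strip command)
            (PySem.Str.strip ((PySem.Str.splitlines raw).getD first ""))) = true
      · rw [if_pos hecho, if_pos hecho, List.drop_take, Nat.add_sub_cancel_left]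
      · have hdrop : (PySem.Str.splitlines raw).drop first =
            (PySem.Str.splitlines raw).getD first "" ::
              (PySem.Str.splitlines raw).drop (first + 1) := by
          rw [List.getD_eq_getElem _ _ hlt]
          exact List.drop_eq_getElem_cons hlt
        rw [if_neg hecho, if_neg hecho, List.drop_take,
            show first + 1 + pvStopIdx ((PySem.Str.splitlines raw).drop (first + 1)) - first
              = pvStopIdx ((PySem.Str.splitlines raw).drop (first + 1)) + 1 from by omega,
            hdrop]
        simp
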